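-- pv_equiv track=rewrite | github.com/i960107/algorithm | baekjoon/2xn타일링.py | solution_dp_tabulation
-- ===== SOURCE A (Python) =====
-- def solution_dp_tabulation(n: int) -> int:
--     '''dynamic programming - tabulation 풀이'''
--     cache = [0] * (n + 1)
--     cache[1] = 1
--     cache[2] = 2
--     i = 3
--     # while not cache[n]:
--     while i <= n:
--         cache[i] = cache[i - 2] + cache[i - 1]
--         i += 1
--
--     return cache[n] % 10007
-- ===== SOURCE B (Python) =====
-- def solution_dp_tabulation(n: int) -> int:
--     '''fast-doubling Fibonacci: O(log n) instead of the O(n) table'''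
--     M = 10007
--
--     def fib_pair(k):
--         # returns (F(k) % M, F(k+1) % M) with F(1) = F(2) = 1
--         if k == 0:
--             return (0, 1)
--         a, b = fib_pair(k // 2)
--         c = (a * (2 * b - a)) % M
--         d = (a * a + b * b) % M
--         if k % 2:
--             return (d, (c + d) % M)
--         return (c, d)
--
--     # the number of 2xn tilings is F(n+1)
--     return fib_pair(n + 1)[0] % M
-- ===== Notes on version B (the rewrite author's own statement) =====
-- stated objective: faster
-- what changed: replaces the O(n) DP table with a fast-doubling Fibonacci recursion computing F(n+1) mod 10007 in O(log n)
-- outside the precondition, e.g. on solution_dp_tabulation(-1): A raises IndexError, B returns 0; on solution_dp_tabulation(0): A raises IndexError, B returns 1; on solution_dp_tabulation(1): A raises IndexError, B returns 1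
-- crash fix: A raises IndexError for n = -1, 0 and 1 (the cache list is too short for the cache[1]/cache[2] writes); B returns the Fibonacci value F(n+1) mod 10007 there (0, 1, 1). — e.g. on solution_dp_tabulation(1): A raises IndexError, B returns 1
import Mathlib
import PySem

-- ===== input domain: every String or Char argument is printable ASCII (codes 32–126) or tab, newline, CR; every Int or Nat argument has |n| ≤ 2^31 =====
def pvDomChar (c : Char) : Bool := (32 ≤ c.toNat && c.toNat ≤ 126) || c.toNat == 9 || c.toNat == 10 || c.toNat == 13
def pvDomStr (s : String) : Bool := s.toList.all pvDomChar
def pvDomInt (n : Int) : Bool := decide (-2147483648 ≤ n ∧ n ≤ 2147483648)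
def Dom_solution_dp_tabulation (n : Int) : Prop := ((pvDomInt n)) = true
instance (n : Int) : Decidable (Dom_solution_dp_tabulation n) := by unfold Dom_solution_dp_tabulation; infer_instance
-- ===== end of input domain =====

-- B replaces A's O(n) DP table with fast-doubling Fibonacci mod 10007 (O(log n)); return value proved equal for n ≥ 2.


-- ===== PORT A =====
def solution_dp_tabulation (n : Int) : Int :=
  let cache : List Int := List.replicate (n + 1).toNat 0     -- cache = [0] * (n + 1)
  let cache := PySem.List.pySetD cache 1 1                   -- cache[1] = 1   (in range under Pre_)
  let cache := PySem.List.pySetD cache 2 2                   -- cache[2] = 2   (in range under Pre_)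
  let cache := (PySem.List.pyRange 3 (n + 1) 1).foldl        -- while i <= n: cache[i] = cache[i-2] + cache[i-1]; i += 1
    (fun c i =>
      PySem.List.pySetD c i
        (PySem.List.pyGetD c (i - 2) 0 + PySem.List.pyGetD c (i - 1) 0)) cache
  PySem.Int.mod (PySem.List.pyGetD cache n 0) 10007          -- return cache[n] % 10007

-- ===== PORT B =====
-- fib_pair k: fast-doubling pair (F(k) % 10007, F(k+1) % 10007); k = k_py (nonnegative wherever B is run)
def pvFibPair : Nat → Int × Int
  | 0 => (0, 1)
  | (k + 1) =>
    let p := pvFibPair ((k + 1) / 2)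
    let a := p.1
    let b := p.2
    let c := PySem.Int.mod (a * (2 * b - a)) 10007
    let d := PySem.Int.mod (a * a + b * b) 10007
    if (k + 1) % 2 = 1 then (d, PySem.Int.mod (c + d) 10007) else (c, d)
decreasing_by exact Nat.div_lt_self (Nat.succ_pos k) (by omega)

def solution_dp_tabulation_alt (n : Int) : Int :=
  PySem.Int.mod (pvFibPair (n + 1).toNat).1 10007            -- return fib_pair(n + 1)[0] % M

-- ===== PRECONDITION & SPEC =====
-- A writes cache[1] and cache[2] into a list of length n+1 and therefore raises IndexError for every n < 2.
def Pre_solution_dp_tabulation (n : Int) : Prop := 2 ≤ n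
instance (n : Int) : Decidable (Pre_solution_dp_tabulation n) := by unfold Pre_solution_dp_tabulation; infer_instance
def pvWitness_solution_dp_tabulation : Int := 5

-- A raises IndexError for n = -1, 0, 1 (the table is too short for the cache[1]/cache[2] writes); B returns F(n+1) mod 10007 there: 0, 1, 1.
def Raises_solution_dp_tabulation (n : Int) : Prop := n = -1 ∨ n = 0 ∨ n = 1
instance (n : Int) : Decidable (Raises_solution_dp_tabulation n) := by unfold Raises_solution_dp_tabulation; infer_instance
def pvRaiseWitness_solution_dp_tabulation : Int := 1
def pvRaiseWitnessOut_solution_dp_tabulation : Int := 1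

def Spec_solution_dp_tabulation (n : Int) (out : Int) : Prop := out = solution_dp_tabulation_alt n
instance (n : Int) (out : Int) : Decidable (Spec_solution_dp_tabulation n out) := by unfold Spec_solution_dp_tabulation; infer_instance

-- ===== CLAIM (what is proved, stated in full; the proofs are below) =====
def Claim_equal_solution_dp_tabulation : Prop := ∀ (n : Int), Dom_solution_dp_tabulation n → Pre_solution_dp_tabulation n → Spec_solution_dp_tabulation n (solution_dp_tabulation n)
def Claim_raises_solution_dp_tabulation : Prop := (∀ (n : Int), Dom_solution_dp_tabulation n → Raises_solution_dp_tabulation n → ¬ Pre_solution_dp_tabulation n) ∧ (Dom_solution_dp_tabulation (pvRaiseWitness_solution_dp_tabulation) ∧ Raises_solution_dp_tabulation (pvRaiseWitness_solution_dp_tabulation) ∧ solution_dp_tabulation_alt (pvRaiseWitness_solution_dp_tabulation) = pvRaiseWitnessOut_solution_dp_tabulation)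

-- ===== LEMMAS AND PROOFS =====

-- modular-congruence facts used by the fast-doubling step
theorem pvModMulSub (a b : Int) : (a % 10007 * (2 * (b % 10007) - a % 10007)) % 10007 = (a * (2 * b - a)) % 10007 := by
  have ha : a % 10007 ≡ a [ZMOD 10007] := Int.emod_emod_of_dvd a dvd_rfl
  have hb : b % 10007 ≡ b [ZMOD 10007] := Int.emod_emod_of_dvd b dvd_rfl
  exact ha.mul (((Int.ModEq.refl 2).mul hb).sub ha)

theorem pvModSq (a b : Int) : (a % 10007 * (a % 10007) + b % 10007 * (b % 10007)) % 10007 = (a * a + b * b) % 10007 := by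
  have ha : a % 10007 ≡ a [ZMOD 10007] := Int.emod_emod_of_dvd a dvd_rfl
  have hb : b % 10007 ≡ b [ZMOD 10007] := Int.emod_emod_of_dvd b dvd_rfl
  exact (ha.mul ha).add (hb.mul hb)

theorem pvModAdd (a b : Int) : (a % 10007 + b % 10007) % 10007 = (a + b) % 10007 := by
  have ha : a % 10007 ≡ a [ZMOD 10007] := Int.emod_emod_of_dvd a dvd_rfl
  have hb : b % 10007 ≡ b [ZMOD 10007] := Int.emod_emod_of_dvd b dvd_rfl
  exact ha.add hb

-- Fibonacci doubling identities, cast to Int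
theorem pvFibDouble (m : Nat) : (Nat.fib (2 * m) : Int) = (Nat.fib m : Int) * (2 * (Nat.fib (m + 1) : Int) - (Nat.fib m : Int)) := by
  have h1 : Nat.fib m ≤ Nat.fib (m + 1) := Nat.fib_mono (by omega)
  have hle : Nat.fib m ≤ 2 * Nat.fib (m + 1) := by omega
  rw [Nat.fib_two_mul]
  push_cast [hle]
  ring

theorem pvFibDoubleAdd (m : Nat) : (Nat.fib (2 * m + 1) : Int) = (Nat.fib (m + 1) : Int) * (Nat.fib (m + 1) : Int) + (Nat.fib m : Int) * (Nat.fib m : Int) := by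
  rw [Nat.fib_two_mul_add_one]
  push_cast
  ring

theorem pvFibPair_eq (k : Nat) :
    pvFibPair k = ((Nat.fib k : Int) % 10007, (Nat.fib (k + 1) : Int) % 10007) := by
  induction k using Nat.strong_induction_on with
  | _ k ih =>
    match k with
    | 0 => simp [pvFibPair]
    | (k + 1) =>
      rw [pvFibPair]
      have hm : (k + 1) / 2 < k + 1 := Nat.div_lt_self (Nat.succ_pos k) (by omega)
      rw [ih _ hm]
      have hpos : (0:Int) < 10007 := by norm_num
      simp only [PySem.Int.mod_eq_emod_of_pos hpos]
      set m := (k + 1) / 2 with hmdef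
      rcases Nat.even_or_odd (k + 1) with he | ho
      · obtain ⟨t, ht⟩ := he
        have hm2 : m = t := by omega
        have hmod : (k + 1) % 2 = 0 := by omega
        rw [hmod, if_neg (by norm_num), Prod.mk.injEq]
        subst hm2
        refine ⟨?_, ?_⟩
        · rw [pvModMulSub, show k + 1 = 2 * m by omega]
          congr 1
          rw [pvFibDouble]
        · rw [pvModSq, show k + 1 + 1 = 2 * m + 1 by omega]
          congr 1
          rw [pvFibDoubleAdd]
          ring
      · obtain ⟨t, ht⟩ := ho
        have hm2 : m = t := by omega
        have hmod : (k + 1) % 2 = 1 := by omega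
        rw [hmod, if_pos rfl, Prod.mk.injEq]
        subst hm2
        refine ⟨?_, ?_⟩
        · rw [pvModSq, show k + 1 = 2 * m + 1 by omega]
          congr 1
          rw [pvFibDoubleAdd]
          ring
        · rw [pvModMulSub, pvModSq, pvModAdd, show k + 1 + 1 = 2 * m + 2 by omega]
          congr 1
          rw [show 2 * m + 2 = (2 * m) + 2 from rfl, Nat.fib_add_two]
          push_cast
          rw [pvFibDouble, pvFibDoubleAdd]
          ring

-- A-side: the table entry at j (for 1 ≤ j) is the (j+1)-st Fibonacci number
def pvG (j : Nat) : Int := if j = 0 then 0 else (Nat.fib (j + 1) : Int)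

def pvStep (c : List Int) (i : Int) : List Int :=
  PySem.List.pySetD c i (PySem.List.pyGetD c (i - 2) 0 + PySem.List.pyGetD c (i - 1) 0)

def pvInit (N : Nat) : List Int :=
  PySem.List.pySetD (PySem.List.pySetD (List.replicate (N + 1) (0:Int)) 1 1) 2 2

theorem pvInit_eq (N : Nat) : pvInit N = ((List.replicate (N + 1) (0:Int)).set 1 1).set 2 2 := by
  simp [pvInit, PySem.List.pySetD_of_nonneg]

theorem pvInvariant (N : Nat) (hN : 2 ≤ N) : ∀ m : Nat, 3 ≤ m → m ≤ N + 1 →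
    ((PySem.List.pyRange 3 (m : Int) 1).foldl pvStep (pvInit N)).length = N + 1 ∧
    ∀ j : Nat, j < m → ((PySem.List.pyRange 3 (m : Int) 1).foldl pvStep (pvInit N)).getD j 0 = pvG j := by
  intro m hm3
  induction m, hm3 using Nat.le_induction with
  | base =>
    intro h3
    rw [show ((3:Nat) : Int) = 3 from rfl, PySem.List.pyRange_one_eq_nil (by omega), List.foldl_nil, pvInit_eq]
    refine ⟨by simp, ?_⟩
    intro j hj
    interval_cases j <;>
      simp [pvG, List.getD,
        show 0 < N + 1 by omega, show 1 < N + 1 by omega, show 2 < N + 1 by omega, Nat.fib]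
  | succ m hm3 ih =>
    intro hle
    have hrange : PySem.List.pyRange 3 ((m + 1 : Nat) : Int) 1
        = PySem.List.pyRange 3 (m : Int) 1 ++ [(m : Int)] := by
      push_cast
      exact PySem.List.pyRange_one_succ_right (by exact_mod_cast (by omega : (3:Nat) ≤ m))
    obtain ⟨hlen, hval⟩ := ih (by omega)
    rw [hrange, List.foldl_append, List.foldl_cons, List.foldl_nil]
    set cm := (PySem.List.pyRange 3 (m : Int) 1).foldl pvStep (pvInit N) with hcm
    have hstep : pvStep cm (m : Int) = cm.set m (pvG (m - 2) + pvG (m - 1)) := by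
      unfold pvStep
      rw [show ((m : Int) - 2) = ((m - 2 : Nat) : Int) by omega,
          show ((m : Int) - 1) = ((m - 1 : Nat) : Int) by omega,
          PySem.List.pyGetD_natCast, PySem.List.pyGetD_natCast,
          PySem.List.pySetD_natCast,
          hval (m - 2) (by omega), hval (m - 1) (by omega)]
    rw [hstep]
    refine ⟨by simp [hlen], ?_⟩
    intro j hj
    by_cases hjm : j = m
    · subst hjm
      rw [List.getD, List.getElem?_set, if_pos rfl, if_pos (by omega)]
      simp only [Option.getD_some]
      have h2 : pvG (j - 2) = (Nat.fib (j - 1) : Int) := by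
        unfold pvG
        rw [if_neg (by omega), show j - 2 + 1 = j - 1 by omega]
      have h1 : pvG (j - 1) = (Nat.fib j : Int) := by
        unfold pvG
        rw [if_neg (by omega), show j - 1 + 1 = j by omega]
      rw [h2, h1]
      unfold pvG
      rw [if_neg (by omega), show j + 1 = (j - 1) + 2 by omega, Nat.fib_add_two,
          show j - 1 + 1 = j by omega]
      push_cast
      ring
    · rw [List.getD, List.getElem?_set, if_neg (by omega)]
      exact hval j (by omega)

theorem a_eq (n : Int) (h : 2 ≤ n) :
    solution_dp_tabulation n = (Nat.fib (n.toNat + 1) : Int) % 10007 := by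
  set N := n.toNat with hNdef
  have hN : 2 ≤ N := by omega
  have hn : n = (N : Int) := by omega
  have hform : solution_dp_tabulation n =
      PySem.Int.mod
        (PySem.List.pyGetD
          ((PySem.List.pyRange 3 ((N : Int) + 1) 1).foldl pvStep (pvInit N)) (N : Int) 0) 10007 := by
    rw [hn]
    unfold solution_dp_tabulation pvStep pvInit
    rw [show (((N : Int)) + 1).toNat = N + 1 by omega]
  obtain ⟨hlen, hval⟩ := pvInvariant N hN (N + 1) (by omega) (by omega)
  rw [hform, show ((N : Int) + 1) = ((N + 1 : Nat) : Int) by push_cast; ring,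
      PySem.List.pyGetD_natCast, hval N (by omega)]
  unfold pvG
  rw [if_neg (by omega), PySem.Int.mod_eq_emod_of_pos (by norm_num)]

theorem alt_eq (n : Int) (h : 0 ≤ n) :
    solution_dp_tabulation_alt n = (Nat.fib (n.toNat + 1) : Int) % 10007 := by
  unfold solution_dp_tabulation_alt
  rw [show (n + 1).toNat = n.toNat + 1 by omega, pvFibPair_eq]
  simp only [PySem.Int.mod_eq_emod_of_pos (by norm_num : (0:Int) < 10007)]
  exact Int.emod_emod_of_dvd _ dvd_rfl

-- ===== VERDICT (by name: the statement is the Claim_ definition above) =====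
theorem solution_dp_tabulation_spec : Claim_equal_solution_dp_tabulation := by
  intro n _ hpre
  unfold Spec_solution_dp_tabulation
  rw [a_eq n hpre, alt_eq n (by exact le_trans (by norm_num) hpre)]

def solution_dp_tabulation_raises : Claim_raises_solution_dp_tabulation := by
  unfold Claim_raises_solution_dp_tabulation
  refine ⟨?_, by decide, by right; right; rfl, ?_⟩
  · intro n _ hr
    unfold Raises_solution_dp_tabulation at hr
    unfold Pre_solution_dp_tabulation
    omega
  · show solution_dp_tabulation_alt 1 = 1
    rw [alt_eq 1 (by norm_num)]
    decide
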